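-- pv_equiv track=rewrite | github.com/codesearchvuln/codesearchvuln | backend/app/services/git_mirror.py | _host_in_allow_list
-- ===== SOURCE A (Python) =====
-- from typing import Any, List
--
-- def _host_in_allow_list(host: str, allow_hosts: List[str]) -> bool:
--     host_lower = str(host or "").strip().lower()
--     if not host_lower or not allow_hosts:
--         return False
--     for allow_host in allow_hosts:
--         candidate = str(allow_host or "").strip().lower()
--         if not candidate:
--             continue
--         if host_lower == candidate or host_lower.endswith(f".{candidate}"):
--             return True
--     return False
-- ===== SOURCE B (Python) =====
-- def _host_in_allow_list(host, allow_hosts):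
--     host_lower = str(host or "").strip().lower()
--     allowed = set()
--     for x in allow_hosts:
--         c = str(x or "").strip().lower()
--         if c:
--             allowed.add(c)
--     if host_lower in allowed:
--         return True
--     for i, ch in enumerate(host_lower):
--         if ch == '.' and host_lower[i + 1:] in allowed:
--             return True
--     return False
-- ===== Notes on version B (the rewrite author's own statement) =====
-- stated objective: alternative
-- what changed: B builds a set of normalized allow-list entries once and probes it with the host and each of its dot-delimited suffixes, instead of scanning the allow-list and testing equality/endswith per entry.
import Mathlib
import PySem

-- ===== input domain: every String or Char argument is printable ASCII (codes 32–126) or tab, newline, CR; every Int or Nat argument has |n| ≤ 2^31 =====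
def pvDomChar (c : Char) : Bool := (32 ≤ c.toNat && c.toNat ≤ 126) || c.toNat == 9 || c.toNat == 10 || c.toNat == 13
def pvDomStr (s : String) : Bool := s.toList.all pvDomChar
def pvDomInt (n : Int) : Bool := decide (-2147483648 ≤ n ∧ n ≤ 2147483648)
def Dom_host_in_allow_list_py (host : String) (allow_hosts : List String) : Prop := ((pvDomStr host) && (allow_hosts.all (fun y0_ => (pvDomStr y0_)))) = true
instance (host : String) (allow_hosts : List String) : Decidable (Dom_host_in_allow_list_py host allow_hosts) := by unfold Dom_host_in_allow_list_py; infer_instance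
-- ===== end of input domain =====

-- B replaces A's per-entry equality/endswith scan by one normalized-candidate set
-- probed with the host and each of its dot-delimited suffixes (objective: alternative).

-- str(x or "").strip().lower() for a str argument (x or "" is x itself when nonempty,
-- "" otherwise, so it is the identity on strings); exact via PySem.Chars (both ports).
def pvNorm (s : String) : List Char := PySem.Chars.lower (PySem.Chars.strip s.toList)

-- ===== PORT A =====
-- the 'for allow_host in allow_hosts' loop; f".{candidate}" ported as '.' :: c (exact)
def pvLoopA (hl : List Char) : List String → Bool
  | [] => false
  | a :: rest =>
    let c := pvNorm a
    if c = [] then pvLoopA hl rest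
    else if (hl == c) || PySem.Chars.endswith hl ('.' :: c) then true
    else pvLoopA hl rest

def host_in_allow_list_py (host : String) (allow_hosts : List String) : Bool :=
  if pvNorm host = [] ∨ allow_hosts = [] then false
  else pvLoopA (pvNorm host) allow_hosts

-- ===== PORT B =====
-- the 'allowed' set built by the first loop of Source B
def pvAllowed (allow_hosts : List String) : PySem.Set (List Char) :=
  allow_hosts.foldl
    (fun s x => let c := pvNorm x; if c = [] then s else PySem.Set.add s c)
    PySem.Set.empty

def host_in_allow_list_py_alt (host : String) (allow_hosts : List String) : Bool :=
  if PySem.Set.contains (pvAllowed allow_hosts) (pvNorm host) then true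
  else
    (PySem.List.enumerate (pvNorm host) 0).any (fun p =>
      p.2 == '.' && PySem.Set.contains (pvAllowed allow_hosts)
        (PySem.List.slice (pvNorm host) (some (p.1 + 1)) none))

-- ===== PRECONDITION & SPEC =====
def Spec_host_in_allow_list_py (host : String) (allow_hosts : List String) (out : Bool) : Prop := out = host_in_allow_list_py_alt host allow_hosts
instance (host : String) (allow_hosts : List String) (out : Bool) : Decidable (Spec_host_in_allow_list_py host allow_hosts out) := by unfold Spec_host_in_allow_list_py; infer_instance

-- ===== CLAIM (what is proved, stated in full; the proofs are below) =====
def Claim_equal_host_in_allow_list_py : Prop := ∀ (host : String) (allow_hosts : List String), Dom_host_in_allow_list_py host allow_hosts → Spec_host_in_allow_list_py host allow_hosts (host_in_allow_list_py host allow_hosts)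

-- ===== LEMMAS AND PROOFS =====

-- characterization of A's loop
theorem pvLoopA_iff (hl : List Char) (l : List String) :
    pvLoopA hl l = true ↔
      ∃ a ∈ l, pvNorm a ≠ [] ∧
        (hl = pvNorm a ∨ PySem.Chars.endswith hl ('.' :: pvNorm a) = true) := by
  induction l with
  | nil => simp [pvLoopA]
  | cons a rest ih =>
    simp only [pvLoopA]
    split_ifs with h1 h2
    · simp [ih, h1]
    · simp only [Bool.or_eq_true, beq_iff_eq] at h2
      exact iff_of_true rfl ⟨a, List.mem_cons_self, h1, h2⟩
    · simp only [Bool.or_eq_true, beq_iff_eq, not_or] at h2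
      simp only [List.mem_cons, ih]
      constructor
      · rintro ⟨b, hb, hc⟩; exact ⟨b, Or.inr hb, hc⟩
      · rintro ⟨b, hb | hb, hne, hm⟩
        · subst hb; exact absurd hm (by tauto)
        · exact ⟨b, hb, hne, hm⟩

-- membership in the candidate set of B
theorem mem_pvAllowed_aux (l : List String) (s : PySem.Set (List Char)) (x : List Char) :
    x ∈ l.foldl (fun s x => let c := pvNorm x; if c = [] then s else PySem.Set.add s c) s ↔
      x ∈ s ∨ ∃ a ∈ l, pvNorm a ≠ [] ∧ x = pvNorm a := by
  induction l generalizing s with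
  | nil => simp
  | cons a rest ih =>
    simp only [List.foldl_cons]
    split_ifs with h
    · rw [ih]
      simp only [List.mem_cons]
      constructor
      · rintro (hx | ⟨b, hb, hc⟩)
        · exact Or.inl hx
        · exact Or.inr ⟨b, Or.inr hb, hc⟩
      · rintro (hx | ⟨b, hb | hb, hne, hx⟩)
        · exact Or.inl hx
        · exact absurd (hb ▸ h) hne
        · exact Or.inr ⟨b, hb, hne, hx⟩
    · rw [ih]
      simp only [PySem.Set.mem_add, List.mem_cons]
      constructor
      · rintro ((hx | hx) | ⟨b, hb, hne, hx⟩)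
        · exact Or.inl hx
        · exact Or.inr ⟨a, Or.inl rfl, h, hx⟩
        · exact Or.inr ⟨b, Or.inr hb, hne, hx⟩
      · rintro (hx | ⟨b, hb | hb, hne, hx⟩)
        · exact Or.inl (Or.inl hx)
        · exact Or.inl (Or.inr (hb ▸ hx))
        · exact Or.inr ⟨b, hb, hne, hx⟩

theorem mem_pvAllowed (l : List String) (x : List Char) :
    x ∈ pvAllowed l ↔ ∃ a ∈ l, pvNorm a ≠ [] ∧ x = pvNorm a := by
  simpa [pvAllowed, PySem.Set.empty] using mem_pvAllowed_aux l PySem.Set.empty x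

-- endswith with a leading dot = there is a dot position whose tail is exactly c
theorem endswith_dot_iff (hl c : List Char) :
    PySem.Chars.endswith hl ('.' :: c) = true ↔
      ∃ k, k < hl.length ∧ hl[k]? = some '.' ∧ hl.drop (k + 1) = c := by
  rw [PySem.Chars.endswith_iff]
  constructor
  · rintro ⟨t, rfl⟩
    refine ⟨t.length, by simp, ?_, ?_⟩
    · rw [List.getElem?_append_right (by omega)]
      simp
    · have h : t ++ '.' :: c = (t ++ ['.']) ++ c := by simp
      have h2 : t.length + 1 = (t ++ ['.']).length := by simp
      rw [h, h2, List.drop_left]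
  · rintro ⟨k, hk, hget, hdrop⟩
    have h2 : hl[k] = '.' := by
      have h3 := List.getElem?_eq_getElem hk
      rw [h3] at hget
      exact Option.some_injective _ hget
    refine ⟨hl.take k, ?_⟩
    conv_rhs => rw [← List.take_append_drop k hl]
    rw [List.drop_eq_getElem_cons hk, h2, hdrop]

-- characterization of B
theorem altB_iff (host : String) (allow_hosts : List String) :
    host_in_allow_list_py_alt host allow_hosts = true ↔
      (pvNorm host ∈ pvAllowed allow_hosts ∨
        ∃ k, k < (pvNorm host).length ∧ (pvNorm host)[k]? = some '.' ∧
          (pvNorm host).drop (k + 1) ∈ pvAllowed allow_hosts) := by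
  unfold host_in_allow_list_py_alt
  set hl := pvNorm host with hhl
  set allowed := pvAllowed allow_hosts
  split_ifs with h
  · simp only [true_iff]
    exact Or.inl ((PySem.Set.contains_iff _ _).mp h)
  · have hnot : hl ∉ pvAllowed allow_hosts := fun hm =>
      h ((PySem.Set.contains_iff _ _).mpr hm)
    simp only [List.any_eq_true, PySem.List.mem_enumerate_iff, Bool.and_eq_true, beq_iff_eq]
    constructor
    · rintro ⟨p, ⟨k, hk, rfl⟩, hdot, hc⟩
      dsimp only at hdot hc
      refine Or.inr ⟨k, hk, ?_, ?_⟩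
      · rw [List.getElem?_eq_getElem hk]; exact congrArg some hdot
      · have h0 : ((0 : Int) + k + 1) = ((k + 1 : Nat) : Int) := by push_cast; ring
        rw [h0, PySem.List.slice_from_natCast] at hc
        exact (PySem.Set.contains_iff _ _).mp hc
    · rintro (hm | ⟨k, hk, hget, hm⟩)
      · exact absurd hm hnot
      · refine ⟨(0 + (k : Int), hl[k]), ⟨k, hk, rfl⟩, ?_, ?_⟩
        · have h1 := List.getElem?_eq_getElem hk
          rw [h1] at hget; injection hget
        · dsimp only
          have h0 : ((0 : Int) + k + 1) = ((k + 1 : Nat) : Int) := by push_cast; ring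
          rw [h0, PySem.List.slice_from_natCast]
          exact (PySem.Set.contains_iff _ _).mpr hm

-- ===== VERDICT (by name: the statement is the Claim_ definition above) =====
theorem host_in_allow_list_py_spec : Claim_equal_host_in_allow_list_py := by
  intro host allow_hosts _
  unfold Spec_host_in_allow_list_py
  have hB := altB_iff host allow_hosts
  unfold host_in_allow_list_py
  set hl := pvNorm host with hhl
  split_ifs with h
  · -- A returns false by its guard; show B is false too
    symm
    rw [Bool.eq_false_iff]
    intro hBt
    rcases hB.mp hBt with hm | ⟨k, hk, _, hm⟩
    · rcases (mem_pvAllowed _ _).mp hm with ⟨a, ha, hne, heq⟩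
      rcases h with h | h
      · exact hne (heq.symm.trans h)
      · subst h; simp at ha
    · rcases (mem_pvAllowed _ _).mp hm with ⟨a, ha, hne, _⟩
      rcases h with h | h
      · rw [h] at hk; simp at hk
      · subst h; simp at ha
  · -- main case: A's loop ↔ B's set probes
    rw [Bool.eq_iff_iff, pvLoopA_iff, hB]
    constructor
    · rintro ⟨a, ha, hne, heq | hsuf⟩
      · exact Or.inl ((mem_pvAllowed _ _).mpr ⟨a, ha, hne, heq⟩)
      · rcases (endswith_dot_iff hl (pvNorm a)).mp hsuf with ⟨k, hk, hget, hdrop⟩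
        exact Or.inr ⟨k, hk, hget, (mem_pvAllowed _ _).mpr ⟨a, ha, hne, hdrop⟩⟩
    · rintro (hm | ⟨k, hk, hget, hm⟩)
      · rcases (mem_pvAllowed _ _).mp hm with ⟨a, ha, hne, heq⟩
        exact ⟨a, ha, hne, Or.inl heq⟩
      · rcases (mem_pvAllowed _ _).mp hm with ⟨a, ha, hne, hdrop⟩
        exact ⟨a, ha, hne, Or.inr ((endswith_dot_iff hl (pvNorm a)).mpr ⟨k, hk, hget, hdrop⟩)⟩
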